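-- pv_equiv track=rewrite | github.com/ayush300302/DAY_09_AM_ | ai_pair_sum.py | find_pairs_improved
-- ===== SOURCE A (Python) =====
-- def find_pairs_improved(lst, target):
--     """
--     Returns unique value-pairs that sum to target.
--     Avoids duplicate pairs like (1,1) appearing 3 times for [1,1,1].
--     Uses a set to track seen pairs.
--     """
--     seen_pairs = set()
--     result = []
--
--     for i in range(len(lst)):
--         for j in range(i + 1, len(lst)):
--             if lst[i] + lst[j] == target:
--                 pair = tuple(sorted((lst[i], lst[j])))
--                 if pair not in seen_pairs:
--                     seen_pairs.add(pair)
--                     result.append(pair)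
--     return result
-- ===== SOURCE B (Python) =====
-- def find_pairs_improved(lst, target):
--     """
--     Returns unique value-pairs that sum to target.
--     For each index i the complement value is fixed (target - lst[i]), so the
--     inner scan is replaced by a precomputed dict of each value's LAST index:
--     a partner j > i exists iff last[complement] > i.  O(n) instead of O(n^2).
--     """
--     last = {}
--     for i in range(len(lst)):
--         last[lst[i]] = i
--     seen_pairs = set()
--     result = []
--     for i in range(len(lst)):
--         comp = target - lst[i]
--         if last.get(comp, -1) > i:
--             pair = (lst[i], comp) if lst[i] <= comp else (comp, lst[i])
--             if pair not in seen_pairs: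
--                 seen_pairs.add(pair)
--                 result.append(pair)
--     return result
-- ===== Notes on version B (the rewrite author's own statement) =====
-- stated objective: faster
-- what changed: The O(n^2) inner scan is removed: since for each index i the only possible partner value is target-lst[i], B precomputes a dict mapping each value to its last index and tests 'last.get(complement,-1) > i' in O(1) per i.
import Mathlib
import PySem

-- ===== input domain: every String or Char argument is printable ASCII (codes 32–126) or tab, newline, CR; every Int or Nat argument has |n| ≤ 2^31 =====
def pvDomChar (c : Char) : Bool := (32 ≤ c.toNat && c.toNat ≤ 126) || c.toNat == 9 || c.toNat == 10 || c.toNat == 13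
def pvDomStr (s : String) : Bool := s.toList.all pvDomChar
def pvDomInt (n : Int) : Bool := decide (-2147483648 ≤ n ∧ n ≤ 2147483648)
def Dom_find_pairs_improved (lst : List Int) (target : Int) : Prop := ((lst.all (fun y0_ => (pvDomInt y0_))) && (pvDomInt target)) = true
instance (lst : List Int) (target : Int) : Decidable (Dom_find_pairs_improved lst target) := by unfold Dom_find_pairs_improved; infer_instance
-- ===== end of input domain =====

-- B replaces A's quadratic inner scan by a precomputed value→last-index dict (faster, asymptotic).

-- ===== PORT A =====
-- transliteration of A: nested index loops, a seen set of sorted pairs, result in discovery order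
def find_pairs_improved (lst : List Int) (target : Int) : List (List Int) :=
  let fin := (PySem.List.pyRange 0 (PySem.List.len lst) 1).foldl
    (fun (st : PySem.Set (List Int) × List (List Int)) i =>
      (PySem.List.pyRange (i + 1) (PySem.List.len lst) 1).foldl
        (fun st j =>
          if PySem.List.pyGetD lst i 0 + PySem.List.pyGetD lst j 0 = target then
            let pair := PySem.List.sorted [PySem.List.pyGetD lst i 0, PySem.List.pyGetD lst j 0] (fun x => x) false
            if PySem.Set.contains st.1 pair then st
            else (PySem.Set.add st.1 pair, st.2 ++ [pair])
          else st) st)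
    ((PySem.Set.empty, []) : PySem.Set (List Int) × List (List Int))
  fin.2

-- ===== PORT B =====
-- transliteration of B: build last-occurrence dict, then a single pass testing last.get(comp,-1) > i
def find_pairs_improved_alt (lst : List Int) (target : Int) : List (List Int) :=
  let last := (PySem.List.pyRange 0 (PySem.List.len lst) 1).foldl
    (fun (d : PySem.Dict Int Int) i => d.insert (PySem.List.pyGetD lst i 0) i) PySem.Dict.empty
  let fin := (PySem.List.pyRange 0 (PySem.List.len lst) 1).foldl
    (fun (st : PySem.Set (List Int) × List (List Int)) i =>
      let comp := target - PySem.List.pyGetD lst i 0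
      if last.getD comp (-1) > i then
        let pair := if PySem.List.pyGetD lst i 0 ≤ comp
          then [PySem.List.pyGetD lst i 0, comp] else [comp, PySem.List.pyGetD lst i 0]
        if PySem.Set.contains st.1 pair then st
        else (PySem.Set.add st.1 pair, st.2 ++ [pair])
      else st)
    ((PySem.Set.empty, []) : PySem.Set (List Int) × List (List Int))
  fin.2

-- ===== PRECONDITION & SPEC =====
def Spec_find_pairs_improved (lst : List Int) (target : Int) (out : List (List Int)) : Prop := out = find_pairs_improved_alt lst target
instance (lst : List Int) (target : Int) (out : List (List Int)) : Decidable (Spec_find_pairs_improved lst target out) := by unfold Spec_find_pairs_improved; infer_instance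

-- ===== CLAIM (what is proved, stated in full; the proofs are below) =====
def Claim_equal_find_pairs_improved : Prop := ∀ (lst : List Int) (target : Int), Dom_find_pairs_improved lst target → Spec_find_pairs_improved lst target (find_pairs_improved lst target)

-- ===== LEMMAS AND PROOFS =====

-- the shared "record pair if new" step of both ports
def pvPush (st : PySem.Set (List Int) × List (List Int)) (p : List Int) :
    PySem.Set (List Int) × List (List Int) :=
  if PySem.Set.contains st.1 p then st else (PySem.Set.add st.1 p, st.2 ++ [p])

theorem pvPush_idem (st : PySem.Set (List Int) × List (List Int)) (p : List Int) :
    pvPush (pvPush st p) p = pvPush st p := by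
  unfold pvPush
  simp only [PySem.Set.contains_iff]
  by_cases h : p ∈ st.1
  · simp [h]
  · simp [h]

-- sorted of a two-element list in closed form
theorem pvSortedPair (a b : Int) :
    PySem.List.sorted [a, b] (fun x => x) false = if a ≤ b then [a, b] else [b, a] := by
  by_cases h : a ≤ b
  · simp only [h, if_true]
    exact PySem.List.sorted_id_eq_of_perm_of_pairwise _ _ (List.Perm.refl _) (by simp [h])
  · simp only [h, if_false]
    exact PySem.List.sorted_id_eq_of_perm_of_pairwise _ _ (List.Perm.swap _ _ _) (by simp; omega)

-- A's inner j-loop collapses: it records the (fixed) pair iff some j in the range matches the complement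
theorem pvInner (lst : List Int) (target v : Int) (js : List Int)
    (st : PySem.Set (List Int) × List (List Int)) :
    js.foldl
      (fun st j =>
        if v + PySem.List.pyGetD lst j 0 = target then
          let pair := PySem.List.sorted [v, PySem.List.pyGetD lst j 0] (fun x => x) false
          if PySem.Set.contains st.1 pair then st
          else (PySem.Set.add st.1 pair, st.2 ++ [pair])
        else st) st
    = if js.any (fun j => PySem.List.pyGetD lst j 0 == target - v)
      then pvPush st (PySem.List.sorted [v, target - v] (fun x => x) false) else st := by
  induction js generalizing st with
  | nil => simp
  | cons j js ih =>
    by_cases h : PySem.List.pyGetD lst j 0 = target - v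
    · have hfst : (if v + PySem.List.pyGetD lst j 0 = target then
          let pair := PySem.List.sorted [v, PySem.List.pyGetD lst j 0] (fun x => x) false
          if PySem.Set.contains st.1 pair then st
          else (PySem.Set.add st.1 pair, st.2 ++ [pair])
        else st) = pvPush st (PySem.List.sorted [v, target - v] (fun x => x) false) := by
        rw [h]
        rw [if_pos (by omega : v + (target - v) = target)]
        rfl
      rw [List.foldl_cons, hfst, ih]
      have hany : (j :: js).any (fun j => PySem.List.pyGetD lst j 0 == target - v) = true := by
        simp [h]
      rw [hany, if_pos rfl]
      by_cases h2 : js.any (fun j => PySem.List.pyGetD lst j 0 == target - v)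
      · rw [if_pos h2, pvPush_idem]
      · rw [if_neg (by simp [h2])]
    · have hfst : (if v + PySem.List.pyGetD lst j 0 = target then
          let pair := PySem.List.sorted [v, PySem.List.pyGetD lst j 0] (fun x => x) false
          if PySem.Set.contains st.1 pair then st
          else (PySem.Set.add st.1 pair, st.2 ++ [pair])
        else st) = st := by
        rw [if_neg (by omega : ¬ (v + PySem.List.pyGetD lst j 0 = target))]
      rw [List.foldl_cons, hfst, ih]
      have hany : (j :: js).any (fun j => PySem.List.pyGetD lst j 0 == target - v)
          = js.any (fun j => PySem.List.pyGetD lst j 0 == target - v) := by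
        simp [h]
      rw [hany]

-- the last-occurrence dict: getD > i iff some index j with i < j < m holds the value
theorem pvLast (lst : List Int) (m : Nat) (v i : Int) (hi : -1 ≤ i) :
    ((PySem.List.pyRange 0 (m : Int) 1).foldl
        (fun (d : PySem.Dict Int Int) j => d.insert (PySem.List.pyGetD lst j 0) j)
        PySem.Dict.empty).getD v (-1) > i
    ↔ ∃ j : Nat, j < m ∧ i < (j : Int) ∧ lst.getD j 0 = v := by
  induction m with
  | zero =>
    simp [PySem.Dict.getD_empty]
    omega
  | succ m ih =>
    have hcast : ((m + 1 : Nat) : Int) = (m : Int) + 1 := by push_cast; ring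
    rw [hcast, PySem.List.pyRange_one_succ_right (by positivity), List.foldl_append,
      List.foldl_cons, List.foldl_nil, PySem.Dict.getD_insert]
    by_cases hv : v = PySem.List.pyGetD lst (m : Int) 0
    · rw [if_pos hv]
      have hg : PySem.List.pyGetD lst (m : Int) 0 = lst.getD m 0 := PySem.List.pyGetD_natCast ..
      constructor
      · intro hmi
        exact ⟨m, by omega, hmi, by rw [hv, hg]⟩
      · rintro ⟨j, hj1, hj2, hj3⟩
        omega
    · rw [if_neg hv]
      rw [ih]
      constructor
      · rintro ⟨j, hj1, hj2, hj3⟩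
        exact ⟨j, by omega, hj2, hj3⟩
      · rintro ⟨j, hj1, hj2, hj3⟩
        refine ⟨j, ?_, hj2, hj3⟩
        rcases Nat.lt_succ_iff_lt_or_eq.mp hj1 with h | h
        · exact h
        · subst h
          exfalso
          exact hv (by rw [PySem.List.pyGetD_natCast, hj3])

-- ===== VERDICT (by name: the statement is the Claim_ definition above) =====
theorem find_pairs_improved_spec : Claim_equal_find_pairs_improved := by
  intro lst target _
  show find_pairs_improved lst target = find_pairs_improved_alt lst target
  unfold find_pairs_improved find_pairs_improved_alt
  simp only [PySem.List.len_eq]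
  congr 1
  apply PySem.List.foldl_congr_mem
  intro st i hi
  rw [PySem.List.mem_pyRange_one] at hi
  rw [pvInner lst target (PySem.List.pyGetD lst i 0)]
  have hiff : ((PySem.List.pyRange (i + 1) ((lst.length : Int)) 1).any
      (fun j => PySem.List.pyGetD lst j 0 == target - PySem.List.pyGetD lst i 0) = true)
      ↔ (((PySem.List.pyRange 0 ((lst.length : Int)) 1).foldl
          (fun (d : PySem.Dict Int Int) j => d.insert (PySem.List.pyGetD lst j 0) j)
          PySem.Dict.empty).getD (target - PySem.List.pyGetD lst i 0) (-1) > i) := by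
    rw [pvLast lst lst.length (target - PySem.List.pyGetD lst i 0) i (by omega)]
    constructor
    · intro h
      rcases List.any_eq_true.mp h with ⟨j, hj, hj2⟩
      rw [PySem.List.mem_pyRange_one] at hj
      have hjt : ((j.toNat : Nat) : Int) = j := by omega
      refine ⟨j.toNat, by omega, by omega, ?_⟩
      have hg : PySem.List.pyGetD lst ((j.toNat : Nat) : Int) 0 = lst.getD j.toNat 0 :=
        PySem.List.pyGetD_natCast ..
      rw [← hg, hjt]
      exact beq_iff_eq.mp hj2
    · rintro ⟨j, hj1, hj2, hj3⟩
      refine List.any_eq_true.mpr ⟨(j : Int), ?_, ?_⟩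
      · rw [PySem.List.mem_pyRange_one]
        omega
      · rw [PySem.List.pyGetD_natCast, hj3]
        exact beq_self_eq_true _
  by_cases hc : ((PySem.List.pyRange 0 ((lst.length : Int)) 1).foldl
      (fun (d : PySem.Dict Int Int) j => d.insert (PySem.List.pyGetD lst j 0) j)
      PySem.Dict.empty).getD (target - PySem.List.pyGetD lst i 0) (-1) > i
  · rw [if_pos (hiff.mpr hc), if_pos hc, pvSortedPair]
    rfl
  · rw [if_neg (fun h => hc (hiff.mp h)), if_neg hc]
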